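-- pv_equiv track=rewrite | github.com/Pionpill/HammerWorkshop-CookingCraft | CookingCraft/BehaviorPack/hammerCookingScripts/client/ui/base/BaseInventoryScreen.py | _GetSlotPath
-- ===== SOURCE A (Python) =====
-- def _GetSlotPath(path):
--     # type: (str) -> str
--     """获取 slot 的UI路径"""
--     oriPathList = path.split("/")
--     if "slot" in oriPathList[-1]:
--         return path
--     newPathList = []
--     for subPath in oriPathList:
--         newPathList.append(subPath)
--         if "slot" in subPath:
--             break
--     return ("/").join(newPathList)
-- ===== SOURCE B (Python) =====
-- def _GetSlotPath(path):
--     # type: (str) -> str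
--     # Substring-search reimplementation: no split/join, no list building.
--     if "slot" in path[path.rfind("/") + 1:]:
--         return path
--     idx = path.find("slot")
--     if idx == -1:
--         return path
--     cut = path.find("/", idx)
--     if cut == -1:
--         return path
--     return path[:cut]
-- ===== Notes on version B (the rewrite author's own statement) =====
-- stated objective: alternative
-- what changed: B truncates via substring search on the raw string (rfind/find/find-from/slice) instead of splitting into a segment list, looping with a break, and joining.
import Mathlib
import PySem

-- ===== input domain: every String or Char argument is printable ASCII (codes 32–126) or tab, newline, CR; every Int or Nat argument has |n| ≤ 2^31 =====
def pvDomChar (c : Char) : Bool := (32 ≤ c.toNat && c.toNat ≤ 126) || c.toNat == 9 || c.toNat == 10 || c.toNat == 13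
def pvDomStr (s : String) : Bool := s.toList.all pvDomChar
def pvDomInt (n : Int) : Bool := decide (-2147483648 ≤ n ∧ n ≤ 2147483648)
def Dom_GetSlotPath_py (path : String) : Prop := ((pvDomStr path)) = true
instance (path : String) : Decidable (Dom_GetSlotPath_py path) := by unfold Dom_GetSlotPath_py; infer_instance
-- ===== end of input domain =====

-- B replaces A's split/loop-with-break/join over a segment list by substring search on the raw
-- string (rfind/find/find-from and one slice); same result, a different decomposition (objective: alternative).

-- ===== PORT A =====
-- the Python for-loop with break: append each subPath, stop after the first one containing "slot"
def buildUntilSlot : List String → List String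
  | [] => []
  | p :: rest => if PySem.Str.isIn "slot" p then [p] else p :: buildUntilSlot rest

def GetSlotPath_py (path : String) : String :=
  match PySem.Str.split? path "/" with
  | none => path          -- unreachable: the separator "/" is non-empty
  | some oriPathList =>
    match PySem.List.pyGet? oriPathList (-1) with
    | none => path        -- unreachable: str.split never returns an empty list
    | some lastSeg =>
      if PySem.Str.isIn "slot" lastSeg then path
      else PySem.Str.join "/" (buildUntilSlot oriPathList)

-- ===== PORT B =====
def GetSlotPath_py_alt (path : String) : String :=
  if PySem.Str.isIn "slot" (PySem.Str.slice path (some (PySem.Str.rfind path "/" + 1)) none) then path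
  else
    let idx := PySem.Str.find path "slot"
    if idx = -1 then path
    else
      let cut := PySem.Str.findFrom path "/" idx
      if cut = -1 then path
      else PySem.Str.slice path none (some cut)

-- ===== PRECONDITION & SPEC =====
def Spec_GetSlotPath_py (path : String) (out : String) : Prop := out = GetSlotPath_py_alt path
instance (path : String) (out : String) : Decidable (Spec_GetSlotPath_py path out) := by unfold Spec_GetSlotPath_py; infer_instance

-- ===== CLAIM (what is proved, stated in full; the proofs are below) =====
def Claim_equal_GetSlotPath_py : Prop := ∀ (path : String), Dom_GetSlotPath_py path → Spec_GetSlotPath_py path (GetSlotPath_py path)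

-- ===== LEMMAS AND PROOFS =====

-- "slot" as a character list
def pvSl : List Char := ['s', 'l', 'o', 't']

-- the segments of a character list split on '/'
def pvSegs : List Char → List (List Char)
  | [] => [[]]
  | c :: r =>
    if c = '/' then [] :: pvSegs r
    else
      match pvSegs r with
      | [] => [[c]]
      | h :: t => (c :: h) :: t

-- prepend a finished chunk onto the head segment
def pvPreCons (pre : List Char) : List (List Char) → List (List Char)
  | [] => [pre]
  | h :: t => (pre ++ h) :: t

-- chars-level mirror of buildUntilSlot
def pvBuild : List (List Char) → List (List Char)
  | [] => []
  | p :: rest => if PySem.Chars.isIn pvSl p then [p] else p :: pvBuild rest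

theorem pvSegs_ne_nil (l : List Char) : pvSegs l ≠ [] := by
  cases l with
  | nil => simp [pvSegs]
  | cons c r =>
    simp only [pvSegs]
    split_ifs with h
    · simp
    · cases hr : pvSegs r <;> simp

theorem pvSegs_exists_cons (l : List Char) : ∃ h t, pvSegs l = h :: t := by
  rcases hc : pvSegs l with _ | ⟨h, t⟩
  · exact absurd hc (pvSegs_ne_nil l)
  · exact ⟨h, t, rfl⟩

theorem splitOn_go_spec (fuel : Nat) : ∀ (l cur : List Char) (acc : List (List Char)),
    l.length ≤ fuel →
    PySem.Chars.splitOn.go ['/'] fuel l cur acc = acc.reverse ++ pvPreCons cur.reverse (pvSegs l) := by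
  induction fuel with
  | zero =>
    intro l cur acc hl
    have hl0 : l = [] := by
      cases l with
      | nil => rfl
      | cons a b => simp at hl
    subst hl0
    simp [PySem.Chars.splitOn.go, pvSegs, pvPreCons]
  | succ fuel ih =>
    intro l cur acc hl
    cases l with
    | nil => simp [PySem.Chars.splitOn.go, pvSegs, pvPreCons]
    | cons c rest =>
      rw [PySem.Chars.splitOn.go]
      by_cases hc : c = '/'
      · subst hc
        have hpre : List.isPrefixOf ['/'] ('/' :: rest) = true := by
          rw [List.isPrefixOf_iff_prefix]
          exact ⟨rest, rfl⟩
        rw [if_pos hpre]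
        have hd : List.drop (['/'] : List Char).length ('/' :: rest) = rest := by simp
        rw [hd, ih rest [] (cur.reverse :: acc) (by simpa using Nat.le_of_succ_le_succ hl)]
        obtain ⟨h, t, hseg⟩ := pvSegs_exists_cons rest
        simp [pvSegs, hseg, pvPreCons]
      · have hpre : List.isPrefixOf ['/'] (c :: rest) = false := by
          rw [Bool.eq_false_iff]
          intro hcon
          rw [List.isPrefixOf_iff_prefix] at hcon
          obtain ⟨w, hw⟩ := hcon
          simp at hw
          exact hc hw.1.symm
        rw [if_neg (by simp [hpre])]
        have := ih rest (c :: cur) acc (by simpa using Nat.le_of_succ_le_succ hl)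
        rw [this]
        obtain ⟨h, t, hseg⟩ := pvSegs_exists_cons rest
        simp [pvSegs, hc, hseg, pvPreCons]

theorem splitOn_slash (s : List Char) : PySem.Chars.splitOn s ['/'] = pvSegs s := by
  unfold PySem.Chars.splitOn
  rw [splitOn_go_spec (s.length + 1) s [] [] (by omega)]
  obtain ⟨h, t, hseg⟩ := pvSegs_exists_cons s
  simp [hseg, pvPreCons]

theorem join_pvSegs (l : List Char) : PySem.Chars.join ['/'] (pvSegs l) = l := by
  induction l with
  | nil => simp [pvSegs, PySem.Chars.join_singleton]
  | cons c r ih =>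
    obtain ⟨h, t, hseg⟩ := pvSegs_exists_cons r
    rw [hseg] at ih
    by_cases hc : c = '/'
    · subst hc
      rw [pvSegs, if_pos rfl, hseg, PySem.Chars.join_cons_cons, ih]
      rfl
    · rw [pvSegs, if_neg hc, hseg]
      cases t with
      | nil =>
        rw [PySem.Chars.join_singleton] at ih ⊢
        simp [ih]
      | cons t0 t1 =>
        rw [PySem.Chars.join_cons_cons] at ih ⊢
        rw [← ih]
        rfl

theorem pvSegs_no_slash (w : List Char) (h : '/' ∉ w) : pvSegs w = [w] := by
  induction w with
  | nil => simp [pvSegs]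
  | cons c r ih =>
    simp only [List.mem_cons] at h
    push_neg at h
    rw [pvSegs, if_neg (fun hc => h.1 hc.symm), ih h.2]

theorem pvSegs_append (u v : List Char) : pvSegs (u ++ '/' :: v) = pvSegs u ++ pvSegs v := by
  induction u with
  | nil => simp [pvSegs]
  | cons c u' ih =>
    by_cases hc : c = '/'
    · subst hc
      simp [pvSegs, ih]
    · obtain ⟨h, t, hseg⟩ := pvSegs_exists_cons u'
      simp only [List.cons_append, pvSegs, if_neg hc, ih, hseg, List.cons_append]

-- decomposition at the LAST '/', or no '/' at all
theorem pvDecomp (s : List Char) : '/' ∉ s ∨ ∃ u v, s = u ++ '/' :: v ∧ '/' ∉ v := by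
  induction s with
  | nil => left; simp
  | cons c r ih =>
    rcases ih with hno | ⟨u, v, hr, hv⟩
    · by_cases hc : c = '/'
      · right; exact ⟨[], r, by simp [hc], hno⟩
      · left
        intro hmem
        rcases List.mem_cons.mp hmem with h1 | h1
        · exact hc h1.symm
        · exact hno h1
    · right; exact ⟨c :: u, v, by simp [hr], hv⟩

-- decomposition at the FIRST '/'
theorem pvDecompFirst (s : List Char) (h : '/' ∈ s) : ∃ a rest, s = a ++ '/' :: rest ∧ '/' ∉ a := by
  induction s with
  | nil => simp at h
  | cons c r ih =>
    by_cases hc : c = '/'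
    · exact ⟨[], r, by simp [hc], by simp⟩
    · have hr : '/' ∈ r := by
        rcases List.mem_cons.mp h with h1 | h2
        · exact absurd h1.symm hc
        · exact h2
      obtain ⟨a, rest, hdec, ha⟩ := ih hr
      refine ⟨c :: a, rest, by simp [hdec], ?_⟩
      intro hmem
      rcases List.mem_cons.mp hmem with h1 | h1
      · exact hc h1.symm
      · exact ha h1

-- uniqueness of the slash-free tail
theorem pvLastUnique : ∀ (u v u' v' : List Char), u ++ '/' :: v = u' ++ '/' :: v' →
    '/' ∉ v → '/' ∉ v' → v = v' := by
  intro u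
  induction u with
  | nil =>
    intro v u' v' heq hv hv'
    cases u' with
    | nil => simpa using heq
    | cons d u'' =>
      simp only [List.nil_append, List.cons_append, List.cons.injEq] at heq
      exfalso
      apply hv
      rw [heq.2]
      simp
  | cons c u'' ih =>
    intro v u' v' heq hv hv'
    cases u' with
    | nil =>
      simp only [List.cons_append, List.nil_append, List.cons.injEq] at heq
      exfalso
      apply hv'
      rw [← heq.2]
      simp
    | cons d u''' =>
      simp only [List.cons_append, List.cons.injEq] at heq
      exact ih v u''' v' heq.2 hv hv'

-- rfind.go equations
theorem rgo_zero (s sub : List Char) :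
    PySem.Chars.rfind.go s sub 0 = if sub.isPrefixOf s then 0 else -1 := by
  simp [PySem.Chars.rfind.go]

theorem rgo_succ (s sub : List Char) (j : Nat) :
    PySem.Chars.rfind.go s sub (j + 1) =
      if sub.isPrefixOf (s.drop (j + 1)) then ((j : Int) + 1) else PySem.Chars.rfind.go s sub j := by
  simp [PySem.Chars.rfind.go]

theorem rgo_none (s : List Char) (k : Nat) (h : ∀ i, i ≤ k → ¬ (['/'] <+: s.drop i)) :
    PySem.Chars.rfind.go s ['/'] k = -1 := by
  induction k with
  | zero =>
    rw [rgo_zero, if_neg]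
    intro hc
    exact h 0 le_rfl (by simpa [List.isPrefixOf_iff_prefix] using hc)
  | succ k ih =>
    rw [rgo_succ, if_neg]
    · exact ih (fun i hi => h i (Nat.le_succ_of_le hi))
    · intro hc
      exact h (k + 1) le_rfl (by simpa [List.isPrefixOf_iff_prefix] using hc)

theorem rgo_hit (s : List Char) (j : Nat) : ∀ (k : Nat), j ≤ k → ['/'] <+: s.drop j →
    (∀ i, j < i → i ≤ k → ¬ ['/'] <+: s.drop i) → PySem.Chars.rfind.go s ['/'] k = (j : Int) := by
  intro k
  induction k with
  | zero =>
    intro hjk hpre _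
    have hj0 : j = 0 := Nat.le_zero.mp hjk
    subst hj0
    have hb : List.isPrefixOf ['/'] s = true := by
      rw [List.isPrefixOf_iff_prefix]
      simpa using hpre
    rw [rgo_zero, if_pos hb]
    simp
  | succ k ih =>
    intro hjk hpre habove
    by_cases hj : j = k + 1
    · subst hj
      have hb : List.isPrefixOf ['/'] (s.drop (k + 1)) = true := by
        rw [List.isPrefixOf_iff_prefix]
        exact hpre
      rw [rgo_succ, if_pos hb]
      push_cast; ring
    · have hjk' : j ≤ k := by omega
      rw [rgo_succ, if_neg]
      · exact ih hjk' hpre (fun i h1 h2 => habove i h1 (Nat.le_succ_of_le h2))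
      · intro hc
        exact habove (k + 1) (by omega) le_rfl (by simpa [List.isPrefixOf_iff_prefix] using hc)

theorem prefix_slash_mem {t : List Char} (h : ['/'] <+: t) : '/' ∈ t := by
  obtain ⟨w, hw⟩ := h
  rw [← hw]; simp

theorem rfind_no_slash (s : List Char) (h : '/' ∉ s) : PySem.Chars.rfind s ['/'] = -1 := by
  unfold PySem.Chars.rfind
  exact rgo_none s s.length (fun i _ hc => h (List.mem_of_mem_drop (prefix_slash_mem hc)))

theorem pvDrop_shift (a rest : List Char) (j : Nat) :
    (a ++ '/' :: rest).drop (a.length + 1 + j) = rest.drop j := by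
  rw [List.drop_append, List.drop_eq_nil_of_le (by omega), List.nil_append]
  have : a.length + 1 + j - a.length = j + 1 := by omega
  rw [this, List.drop_succ_cons]

theorem rfind_last (u v : List Char) (hv : '/' ∉ v) :
    PySem.Chars.rfind (u ++ '/' :: v) ['/'] = (u.length : Int) := by
  unfold PySem.Chars.rfind
  apply rgo_hit
  · simp
  · rw [List.drop_left]
    exact ⟨v, rfl⟩
  · intro i h1 h2 hc
    have hdrop : ((u ++ '/' :: v).drop i) = v.drop (i - u.length - 1) := by
      rw [show i = u.length + 1 + (i - u.length - 1) from by omega, pvDrop_shift]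
      congr 1
      omega
    rw [hdrop] at hc
    exact hv (List.mem_of_mem_drop (prefix_slash_mem hc))

-- find pinned by a first occurrence
theorem find_pin (t sub : List Char) (m : Nat) (h1 : sub <+: t.drop m)
    (h2 : ∀ i, i < m → ¬ sub <+: t.drop i) : PySem.Chars.find t sub = (m : Int) := by
  have hin : PySem.Chars.isIn sub t = true :=
    (PySem.Chars.exists_prefix_drop_iff_isIn sub t).mp ⟨m, h1⟩
  have hnn : 0 ≤ PySem.Chars.find t sub :=
    (PySem.Chars.find_nonneg_iff t sub).mpr ((PySem.Chars.isIn_iff_infix sub t).mp hin)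
  obtain ⟨hp, hmin⟩ := PySem.Chars.find_spec hnn
  have hF : (PySem.Chars.find t sub).toNat = m := by
    rcases Nat.lt_trichotomy (PySem.Chars.find t sub).toNat m with hlt | heq | hgt
    · exact absurd hp (h2 _ hlt)
    · exact heq
    · exact absurd h1 (hmin m hgt)
  rw [← Int.toNat_of_nonneg hnn, hF]

-- an occurrence of "slot" starting inside the slash-free prefix a lies wholly inside a
theorem no_cross (a rest : List Char) (ha : '/' ∉ a) (i : Nat) (hi : i ≤ a.length)
    (h : pvSl <+: (a ++ '/' :: rest).drop i) : i + 4 ≤ a.length ∧ pvSl <+: a.drop i := by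
  have hdrop : (a ++ '/' :: rest).drop i = a.drop i ++ '/' :: rest := by
    rw [List.drop_append, Nat.sub_eq_zero_of_le hi, List.drop_zero]
  rw [hdrop] at h
  obtain ⟨w, hw⟩ := h
  have hd : (a.drop i).length = a.length - i := by simp
  by_cases hlen : 4 ≤ (a.drop i).length
  · constructor
    · omega
    · have htake : (a.drop i ++ '/' :: rest).take 4 = (a.drop i).take 4 :=
        List.take_append_of_le_length hlen
      have htake2 : (pvSl ++ w).take 4 = pvSl := by
        rw [List.take_append_of_le_length (by simp [pvSl])]
        simp [pvSl]
      have : (a.drop i).take 4 = pvSl := by rw [← htake, ← hw, htake2]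
      rw [← this]
      exact List.take_prefix 4 (a.drop i)
  · exfalso
    push_neg at hlen
    set d := (a.drop i).length with hdd
    have hlenL : d < (a.drop i ++ '/' :: rest).length := by
      simp only [List.length_append, List.length_cons]
      omega
    have hL : (a.drop i ++ '/' :: rest)[d] = '/' := by
      rw [List.getElem_append_right (by omega)]
      simp [hdd]
    have hlenR : d < (pvSl ++ w).length := by simp [pvSl]; omega
    have hR : (pvSl ++ w)[d] = pvSl[d]'(by simp [pvSl]; omega) := by
      rw [List.getElem_append_left (by simp [pvSl]; omega)]
    have heq : ('/' : Char) = pvSl[d]'(by simp [pvSl]; omega) := by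
      rw [← hL, ← hR]
      congr 1
      exact hw.symm
    have hd4 : d < 4 := by simpa [pvSl] using hlen
    interval_cases d <;> simp [pvSl] at heq

-- after the first "slot" occurrence there is still a '/', provided the last segment has no "slot"
theorem slash_after (u v : List Char) (hv : '/' ∉ v) (hnv : ¬ pvSl <:+: v) (k : Nat)
    (hk : pvSl <+: (u ++ '/' :: v).drop k) : ['/'] <:+: (u ++ '/' :: v).drop k := by
  rcases Nat.lt_trichotomy k u.length with hlt | heq | hgt
  · have hsl : ['/'] <+: (u ++ '/' :: v).drop u.length := by
      rw [List.drop_left]; exact ⟨v, rfl⟩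
    have : (u ++ '/' :: v).drop u.length = ((u ++ '/' :: v).drop k).drop (u.length - k) := by
      rw [List.drop_drop]
      congr 1
      omega
    rw [this] at hsl
    exact List.IsInfix.trans (List.IsPrefix.isInfix hsl) (List.IsSuffix.isInfix (List.drop_suffix _ _))
  · subst heq
    rw [List.drop_left] at hk
    obtain ⟨w, hw⟩ := hk
    simp [pvSl] at hw
  · exfalso
    apply hnv
    have hdrop : (u ++ '/' :: v).drop k = v.drop (k - u.length - 1) := by
      rw [show k = u.length + 1 + (k - u.length - 1) from by omega, pvDrop_shift]
      congr 1
      omega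
    rw [hdrop] at hk
    exact List.IsInfix.trans (List.IsPrefix.isInfix hk) (List.IsSuffix.isInfix (List.drop_suffix _ _))

theorem pvBuild_all_no_slot (L : List (List Char)) (h : ∀ p ∈ L, PySem.Chars.isIn pvSl p = false) :
    pvBuild L = L := by
  induction L with
  | nil => rfl
  | cons p rest ih =>
    rw [pvBuild, if_neg (by simp [h p (by simp)]), ih (fun q hq => h q (by simp [hq]))]

-- every segment is an infix of the original list
theorem pvSegs_head_prefix (l : List Char) : ∀ h t, pvSegs l = h :: t → h <+: l := by
  induction l with
  | nil => intro h t hseg; simp [pvSegs] at hseg; simp [hseg.1]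
  | cons c r ih =>
    intro h t hseg
    by_cases hc : c = '/'
    · subst hc
      simp [pvSegs] at hseg
      simp [hseg.1]
    · obtain ⟨h', t', hseg'⟩ := pvSegs_exists_cons r
      rw [pvSegs, if_neg hc, hseg'] at hseg
      simp only [List.cons.injEq] at hseg
      rw [← hseg.1]
      exact (List.prefix_cons_inj c).mpr (ih h' t' hseg')

theorem pvSegs_infix (l : List Char) : ∀ p ∈ pvSegs l, p <:+: l := by
  induction l with
  | nil => intro p hp; simp [pvSegs] at hp; simp [hp]
  | cons c r ih =>
    intro p hp
    by_cases hc : c = '/'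
    · subst hc
      simp [pvSegs] at hp
      rcases hp with hp | hp
      · simp [hp]
      · exact List.infix_cons (ih p hp)
    · obtain ⟨h, t, hseg⟩ := pvSegs_exists_cons r
      rw [pvSegs, if_neg hc, hseg] at hp
      rcases List.mem_cons.mp hp with hp | hp
      · rw [hp]
        exact List.IsPrefix.isInfix ((List.prefix_cons_inj c).mpr (pvSegs_head_prefix r h t hseg))
      · exact List.infix_cons (ih p (by rw [hseg]; simp [hp]))

-- the MAIN truncation lemma: A's join-up-to-first-slot-segment equals B's cut at the
-- first '/' after the first "slot" occurrence
theorem pvMain : ∀ (n : Nat) (s : List Char), s.length ≤ n → pvSl <:+: s → ('/' ∈ s) →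
    (∀ u v, s = u ++ '/' :: v → '/' ∉ v → ¬ pvSl <:+: v) →
    PySem.Chars.join ['/'] (pvBuild (pvSegs s)) =
      s.take (PySem.Chars.findFrom s ['/'] (PySem.Chars.find s pvSl)).toNat := by
  intro n
  induction n with
  | zero =>
    intro s hlen _ hslash _
    have hnil : s = [] := List.eq_nil_of_length_eq_zero (Nat.le_zero.mp hlen)
    subst hnil
    simp at hslash
  | succ n ih =>
    intro s hlen hocc hslash hlast
    obtain ⟨a, rest, hs, ha⟩ := pvDecompFirst s hslash
    subst hs
    have hsegs : pvSegs (a ++ '/' :: rest) = a :: pvSegs rest := by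
      rw [pvSegs_append, pvSegs_no_slash a ha]
      rfl
    have hdropm : ∀ i : Nat, i ≤ a.length → (a ++ '/' :: rest).drop i = a.drop i ++ '/' :: rest := by
      intro i hi
      rw [List.drop_append, Nat.sub_eq_zero_of_le hi, List.drop_zero]
    by_cases hsa : pvSl <:+: a
    · -- first "slot" occurrence lies inside a: both sides give a
      have hina : PySem.Chars.isIn pvSl a = true := (PySem.Chars.isIn_iff_infix _ _).mpr hsa
      have hnn : 0 ≤ PySem.Chars.find a pvSl := (PySem.Chars.find_nonneg_iff a pvSl).mpr hsa
      set m := (PySem.Chars.find a pvSl).toNat with hm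
      obtain ⟨hp, hmin⟩ := PySem.Chars.find_spec hnn
      have hm_le : m ≤ a.length := by
        have := PySem.Chars.find_le_length a pvSl
        omega
      have hfind : PySem.Chars.find (a ++ '/' :: rest) pvSl = (m : Int) := by
        apply find_pin
        · rw [hdropm m hm_le]
          exact List.IsPrefix.trans hp (List.prefix_append _ _)
        · intro i hi hcon
          exact hmin i hi (no_cross a rest ha i (by omega) hcon).2
      have hg : PySem.Chars.find ((a ++ '/' :: rest).drop m) ['/'] = ((a.length - m : Nat) : Int) := by
        rw [hdropm m hm_le]
        apply find_pin
        · have hlen2 : (a.drop m).length = a.length - m := by simp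
          rw [show (a.drop m ++ '/' :: rest).drop (a.length - m) = '/' :: rest from by
                rw [← hlen2, List.drop_left]]
          exact ⟨rest, rfl⟩
        · intro i hi2 hcon
          have hsplit : (a.drop m ++ '/' :: rest).drop i = (a.drop m).drop i ++ '/' :: rest := by
            rw [List.drop_append, Nat.sub_eq_zero_of_le (by simp; omega), List.drop_zero]
          rw [hsplit] at hcon
          obtain ⟨w, hw⟩ := hcon
          cases hdd : (a.drop m).drop i with
          | nil =>
            have hlen4 := congrArg List.length hdd
            simp at hlen4
            omega
          | cons y ys =>
            rw [hdd] at hw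
            simp only [List.cons_append, List.nil_append] at hw
            have hy : y = '/' := ((List.cons.injEq _ _ _ _).mp hw).1.symm
            have hmem : y ∈ a := by
              have : y ∈ (a.drop m).drop i := by rw [hdd]; simp
              exact List.mem_of_mem_drop (List.mem_of_mem_drop this)
            rw [hy] at hmem
            exact ha hmem
      have hff : PySem.Chars.findFrom (a ++ '/' :: rest) ['/'] ((m : Nat) : Int) = (a.length : Int) := by
        rw [PySem.Chars.findFrom_natCast _ _ m (by simp; omega), hg, if_neg (by omega)]
        push_cast
        omega
      rw [hfind, hff]
      rw [show ((a.length : Int)).toNat = a.length from rfl, List.take_left]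
      rw [hsegs]
      rw [show pvBuild (a :: pvSegs rest) = [a] from by rw [pvBuild, if_pos hina]]
      exact PySem.Chars.join_singleton _ _
    · -- first "slot" occurrence lies beyond a: recurse on rest
      have hina : PySem.Chars.isIn pvSl a = false := (PySem.Chars.isIn_eq_false_iff _ _).mpr hsa
      have hshift : ∀ j : Nat, a.length < j → (a ++ '/' :: rest).drop j = rest.drop (j - a.length - 1) := by
        intro j hj
        rw [show j = a.length + 1 + (j - a.length - 1) from by omega, pvDrop_shift]
        congr 1
        omega
      have hocc_rest : pvSl <:+: rest := by
        have hin : PySem.Chars.isIn pvSl (a ++ '/' :: rest) = true :=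
          (PySem.Chars.isIn_iff_infix _ _).mpr hocc
        obtain ⟨j, hj⟩ := (PySem.Chars.exists_prefix_drop_iff_isIn pvSl _).mpr hin
        by_cases hja : j ≤ a.length
        · exact absurd (List.IsInfix.trans (List.IsPrefix.isInfix (no_cross a rest ha j hja hj).2)
            (List.IsSuffix.isInfix (List.drop_suffix _ _))) hsa
        · rw [hshift j (by omega)] at hj
          exact List.IsInfix.trans (List.IsPrefix.isInfix hj)
            (List.IsSuffix.isInfix (List.drop_suffix _ _))
      have hslash_rest : '/' ∈ rest := by
        by_contra hno
        exact hlast a rest rfl hno hocc_rest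
      have hlast_rest : ∀ u v, rest = u ++ '/' :: v → '/' ∉ v → ¬ pvSl <:+: v := by
        intro u v hr hv
        exact hlast (a ++ '/' :: u) v (by rw [hr]; simp) hv
      have IH := ih rest (by simp at hlen; omega) hocc_rest hslash_rest hlast_rest
      have hnn : 0 ≤ PySem.Chars.find rest pvSl :=
        (PySem.Chars.find_nonneg_iff rest pvSl).mpr hocc_rest
      set m := (PySem.Chars.find rest pvSl).toNat with hm
      obtain ⟨hp, hmin⟩ := PySem.Chars.find_spec hnn
      have hm_le : m ≤ rest.length := by
        have := PySem.Chars.find_le_length rest pvSl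
        omega
      have hfind : PySem.Chars.find (a ++ '/' :: rest) pvSl = ((a.length + 1 + m : Nat) : Int) := by
        apply find_pin
        · rw [pvDrop_shift]
          exact hp
        · intro i hi hcon
          by_cases hia : i ≤ a.length
          · exact hsa (List.IsInfix.trans (List.IsPrefix.isInfix (no_cross a rest ha i hia hcon).2)
              (List.IsSuffix.isInfix (List.drop_suffix _ _)))
          · rw [hshift i (by omega)] at hcon
            exact hmin (i - a.length - 1) (by omega) hcon
      obtain ⟨u', v', hr', hv'⟩ := (pvDecomp rest).resolve_left (fun h => h hslash_rest)
      have hnv' : ¬ pvSl <:+: v' := hlast_rest u' v' hr' hv'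
      have hgslash : ['/'] <:+: rest.drop m := by
        rw [hr']
        exact slash_after u' v' hv' hnv' m (by rw [← hr']; exact hp)
      set g := PySem.Chars.find (rest.drop m) ['/'] with hgdef
      have hgne : g ≠ -1 := (PySem.Chars.find_ne_neg_one_iff _ _).mpr hgslash
      have hg0 : 0 ≤ g := (PySem.Chars.find_nonneg_iff _ _).mpr hgslash
      have hffs : PySem.Chars.findFrom (a ++ '/' :: rest) ['/'] ((a.length + 1 + m : Nat) : Int)
          = ((a.length + 1 + m : Nat) : Int) + g := by
        rw [PySem.Chars.findFrom_natCast _ _ _ (by simp; omega), pvDrop_shift, ← hgdef,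
          if_neg hgne]
      have hffr : PySem.Chars.findFrom rest ['/'] (PySem.Chars.find rest pvSl) = (m : Int) + g := by
        rw [show PySem.Chars.find rest pvSl = ((m : Nat) : Int) from (Int.toNat_of_nonneg hnn).symm,
          PySem.Chars.findFrom_natCast _ _ m hm_le, ← hgdef, if_neg hgne]
      rw [hfind, hffs, hsegs]
      rw [show pvBuild (a :: pvSegs rest) = a :: pvBuild (pvSegs rest) from by
            rw [pvBuild, if_neg (by rw [hina]; simp)]]
      obtain ⟨h0, t0, hbr⟩ : ∃ h0 t0, pvBuild (pvSegs rest) = h0 :: t0 := by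
        obtain ⟨hh, tt, hseg2⟩ := pvSegs_exists_cons rest
        rw [hseg2, pvBuild]
        split_ifs <;> exact ⟨_, _, rfl⟩
      rw [hbr, PySem.Chars.join_cons_cons, ← hbr, IH, hffr]
      have harith : (((a.length + 1 + m : Nat) : Int) + g) = ((a.length + 1 + (m + g.toNat) : Nat) : Int) := by
        push_cast
        omega
      have hgnat : ((m : Int) + g).toNat = m + g.toNat := by omega
      rw [harith, Int.toNat_natCast, hgnat, List.take_append]
      have h1 : List.take (a.length + 1 + (m + g.toNat)) a = a := List.take_of_length_le (by omega)
      have h2 : a.length + 1 + (m + g.toNat) - a.length = (m + g.toNat) + 1 := by omega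
      rw [h1, h2, List.take_succ_cons]
      simp

theorem pyGet_neg_one {α : Type} (xs : List α) (h : xs ≠ []) :
    PySem.List.pyGet? xs (-1) = xs.getLast? := by
  have hl : 0 < xs.length := List.length_pos_iff.mpr h
  unfold PySem.List.pyGet? PySem.List.pyIdx?
  rw [if_neg (by omega), if_pos (by omega), List.getLast?_eq_getElem?]
  simp

theorem split_eq (path : String) : ∃ L, PySem.Str.split? path "/" = some L ∧
    L.map String.toList = pvSegs path.toList := by
  have h := PySem.Str.split?_map path "/"
  cases hs : PySem.Str.split? path "/" with
  | none =>
    rw [hs] at h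
    simp [PySem.Chars.split?] at h
  | some L =>
    refine ⟨L, rfl, ?_⟩
    rw [hs] at h
    simp only [Option.map_some] at h
    have : PySem.Chars.split? path.toList ("/" : String).toList =
        some (pvSegs path.toList) := by
      rw [show ("/" : String).toList = ['/'] from rfl, PySem.Chars.split?]
      simp [splitOn_slash]
    rw [this] at h
    exact Option.some.inj h

theorem buildUntilSlot_map : ∀ L : List String,
    (buildUntilSlot L).map String.toList = pvBuild (L.map String.toList) := by
  intro L
  induction L with
  | nil => rfl
  | cons p rest ih =>
    rw [buildUntilSlot, List.map_cons, pvBuild]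
    rw [show PySem.Str.isIn "slot" p = PySem.Chars.isIn pvSl p.toList from
      PySem.Str.isIn_eq "slot" p]
    by_cases hp : PySem.Chars.isIn pvSl p.toList = true
    · rw [if_pos hp, if_pos hp]
      rfl
    · rw [if_neg hp, if_neg hp, List.map_cons, ih]

-- ===== VERDICT (by name: the statement is the Claim_ definition above) =====
theorem GetSlotPath_py_spec : Claim_equal_GetSlotPath_py := by
  unfold Claim_equal_GetSlotPath_py
  intro path _
  unfold Spec_GetSlotPath_py
  obtain ⟨L, hsplit, hmap⟩ := split_eq path
  have hLne : L ≠ [] := by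
    intro h0
    rw [h0] at hmap
    exact pvSegs_ne_nil path.toList hmap.symm
  -- the last segment, at the character level
  obtain ⟨lastS, hlastS⟩ : ∃ q, L.getLast? = some q := by
    cases hq : L.getLast? with
    | none => exact absurd (List.getLast?_eq_none_iff.mp hq) hLne
    | some q => exact ⟨q, rfl⟩
  have hlastC : (pvSegs path.toList).getLast? = some lastS.toList := by
    rw [← hmap, List.getLast?_map, hlastS]
    rfl
  -- port A reduced
  have hA : GetSlotPath_py path =
      (if PySem.Chars.isIn pvSl lastS.toList then path
       else PySem.Str.join "/" (buildUntilSlot L)) := by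
    unfold GetSlotPath_py
    rw [hsplit]
    show (match PySem.List.pyGet? L (-1) with
      | none => path
      | some lastSeg =>
        if PySem.Str.isIn "slot" lastSeg = true then path
        else PySem.Str.join "/" (buildUntilSlot L)) = _
    rw [pyGet_neg_one L hLne, hlastS]
    show (if PySem.Str.isIn "slot" lastS = true then path
      else PySem.Str.join "/" (buildUntilSlot L)) = _
    rw [show PySem.Str.isIn "slot" lastS = PySem.Chars.isIn pvSl lastS.toList from
      PySem.Str.isIn_eq "slot" lastS]
  -- port B's first test is the same test
  have hg2 : PySem.Str.rfind path "/" = PySem.Chars.rfind path.toList ['/'] := by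
    rw [PySem.Str.rfind_eq]
    rfl
  have hBtest : PySem.Str.isIn "slot"
      (PySem.Str.slice path (some (PySem.Str.rfind path "/" + 1)) none) =
      PySem.Chars.isIn pvSl lastS.toList := by
    rw [PySem.Str.isIn_eq, PySem.Str.toList_slice, hg2]
    rcases pvDecomp path.toList with hno | ⟨u, v, hd, hv⟩
    · rw [rfind_no_slash _ hno]
      norm_num [PySem.Chars.slice_eq_listSlice, PySem.List.slice_none_none]
      have : pvSegs path.toList = [path.toList] := pvSegs_no_slash _ hno
      rw [this] at hlastC
      simp at hlastC
      rw [← hlastC]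
      rfl
    · rw [hd, rfind_last u v hv]
      have hvv : (pvSegs (u ++ '/' :: v)).getLast? = some v := by
        rw [pvSegs_append, pvSegs_no_slash v hv, List.getLast?_concat]
      rw [hd] at hlastC
      rw [hlastC] at hvv
      have hveq : lastS.toList = v := by injection hvv
      rw [PySem.Chars.slice_eq_listSlice,
        show (u.length : Int) + 1 = ((u.length + 1 : Nat) : Int) from by push_cast; ring,
        PySem.List.slice_from_natCast, pvDrop_shift u v 0, List.drop_zero, hveq]
      rfl
  rw [hA]
  by_cases htest : PySem.Chars.isIn pvSl lastS.toList = true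
  · rw [if_pos htest]
    unfold GetSlotPath_py_alt
    rw [hBtest, if_pos htest]
  · rw [if_neg htest]
    rw [Bool.not_eq_true] at htest
    -- character-level value of A's join
    have hAval : (PySem.Str.join "/" (buildUntilSlot L)).toList =
        PySem.Chars.join ['/'] (pvBuild (pvSegs path.toList)) := by
      rw [PySem.Str.toList_join, buildUntilSlot_map, hmap]
      rfl
    unfold GetSlotPath_py_alt
    rw [hBtest, htest]
    simp only [Bool.false_eq_true, if_false]
    by_cases hocc : PySem.Chars.isIn pvSl path.toList = true
    · -- "slot" occurs somewhere, but not in the last segment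
      rcases pvDecomp path.toList with hno | ⟨u, v, hd, hv⟩
      · exfalso
        have hseq : pvSegs path.toList = [path.toList] := pvSegs_no_slash _ hno
        rw [hseq] at hlastC
        simp at hlastC
        rw [← hlastC] at htest
        simp [htest] at hocc
      · have hinf : pvSl <:+: path.toList := (PySem.Chars.isIn_iff_infix _ _).mp hocc
        have hveq : lastS.toList = v := by
          have hvv : (pvSegs (u ++ '/' :: v)).getLast? = some v := by
            rw [pvSegs_append, pvSegs_no_slash v hv, List.getLast?_concat]
          rw [← hd, hlastC] at hvv
          injection hvv
        have hnv : ¬ pvSl <:+: v := by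
          rw [← hveq]
          exact (PySem.Chars.isIn_eq_false_iff _ _).mp htest
        have hidx0 : 0 ≤ PySem.Chars.find path.toList pvSl :=
          (PySem.Chars.find_nonneg_iff _ _).mpr hinf
        set k := (PySem.Chars.find path.toList pvSl).toNat with hk
        obtain ⟨hp, hmin⟩ := PySem.Chars.find_spec hidx0
        have hk_le : k ≤ path.toList.length := by
          have := PySem.Chars.find_le_length path.toList pvSl
          omega
        have hcut_inf : ['/'] <:+: path.toList.drop k := by
          rw [hd]
          exact slash_after u v hv hnv k (by rw [← hd]; exact hp)
        have hfind_eq : PySem.Str.find path "slot" = PySem.Chars.find path.toList pvSl := by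
          rw [PySem.Str.find_eq]
          rfl
        have hidxcast : PySem.Chars.find path.toList pvSl = ((k : Nat) : Int) :=
          (Int.toNat_of_nonneg hidx0).symm
        have hidxne : PySem.Str.find path "slot" ≠ -1 := by
          rw [hfind_eq]
          exact (PySem.Chars.find_ne_neg_one_iff _ _).mpr hinf
        have hffeq : PySem.Str.findFrom path "/" (PySem.Str.find path "slot") =
            PySem.Chars.findFrom path.toList ['/'] ((k : Nat) : Int) := by
          rw [PySem.Str.findFrom_eq, hfind_eq, hidxcast]
          rfl
        have hcf : PySem.Chars.findFrom path.toList ['/'] ((k : Nat) : Int) =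
            (k : Int) + PySem.Chars.find (path.toList.drop k) ['/'] := by
          rw [PySem.Chars.findFrom_natCast _ _ k hk_le,
            if_neg ((PySem.Chars.find_ne_neg_one_iff _ _).mpr hcut_inf)]
        have hgd0 : 0 ≤ PySem.Chars.find (path.toList.drop k) ['/'] :=
          (PySem.Chars.find_nonneg_iff _ _).mpr hcut_inf
        have hcutne : PySem.Str.findFrom path "/" (PySem.Str.find path "slot") ≠ -1 := by
          rw [hffeq, hcf]
          omega
        rw [if_neg hidxne, if_neg hcutne]
        -- both sides, at the character level
        apply String.toList_inj.mp
        rw [PySem.Str.toList_slice, PySem.Chars.slice_eq_listSlice,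
          PySem.List.slice_to _ (by rw [hffeq, hcf]; omega), hAval]
        rw [pvMain path.toList.length path.toList le_rfl hinf
          (by rw [hd]; simp)
          (by
            intro u0 v0 h0 hv0
            rw [pvLastUnique u0 v0 u v (by rw [← h0, ← hd]) hv0 hv]
            exact hnv)]
        rw [hffeq, hidxcast]
    · -- no "slot" anywhere: both sides return the whole path
      rw [Bool.not_eq_true] at hocc
      have hidx : PySem.Str.find path "slot" = -1 := by
        rw [PySem.Str.find_eq,
          show ("slot" : String).toList = pvSl from rfl]
        exact (PySem.Chars.find_eq_neg_one_iff _ _).mpr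
          ((PySem.Chars.isIn_eq_false_iff _ _).mp hocc)
      rw [if_pos hidx]
      apply String.toList_inj.mp
      rw [hAval, pvBuild_all_no_slot]
      · exact join_pvSegs path.toList
      · intro p hp
        rw [PySem.Chars.isIn_eq_false_iff]
        intro hcon
        exact (PySem.Chars.isIn_eq_false_iff _ _).mp hocc
          (List.IsInfix.trans hcon (pvSegs_infix path.toList p hp))
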